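-- pv_equiv track=rewrite | github.com/alvincho/attas | attas/pulsers/yfinance_pulser.py | _normalize_statement_label
-- ===== SOURCE A (Python) =====
-- from typing import Any, Dict, Optional
--
-- def _normalize_statement_label(value: Any) -> str:
--     text = str(value or "").strip().lower()
--     for old, new in (
--         ("&", " and "),
--         ("/", " "),
--         ("-", " "),
--         ("_", " "),
--         (".", " "),
--     ):
--         text = text.replace(old, new)
--     return " ".join(text.split())
-- ===== SOURCE B (Python) =====
-- def _normalize_statement_label(value):
--     # One-pass tokenizer: scan the string once, emitting words directly
--     # (separators = whitespace and / - _ . ; '&' emits the word "and").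
--     tokens = []
--     word = []
--     for ch in str(value or "").strip().lower():
--         if ch == "&":
--             if word:
--                 tokens.append("".join(word))
--                 word = []
--             tokens.append("and")
--         elif ch in "/-_." or ch.isspace():
--             if word:
--                 tokens.append("".join(word))
--                 word = []
--         else:
--             word.append(ch)
--     if word:
--         tokens.append("".join(word))
--     return " ".join(tokens)
-- ===== Notes on version B (the rewrite author's own statement) =====
-- stated objective: alternative
-- what changed: Replaces A's staged pipeline (five sequential replace rewrites, then split and join) with a single-pass tokenizer that scans the string once with a word accumulator, treating the four special characters and whitespace as separators and the ampersand as the word and, so no intermediate rewritten string is ever built.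
import Mathlib
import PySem

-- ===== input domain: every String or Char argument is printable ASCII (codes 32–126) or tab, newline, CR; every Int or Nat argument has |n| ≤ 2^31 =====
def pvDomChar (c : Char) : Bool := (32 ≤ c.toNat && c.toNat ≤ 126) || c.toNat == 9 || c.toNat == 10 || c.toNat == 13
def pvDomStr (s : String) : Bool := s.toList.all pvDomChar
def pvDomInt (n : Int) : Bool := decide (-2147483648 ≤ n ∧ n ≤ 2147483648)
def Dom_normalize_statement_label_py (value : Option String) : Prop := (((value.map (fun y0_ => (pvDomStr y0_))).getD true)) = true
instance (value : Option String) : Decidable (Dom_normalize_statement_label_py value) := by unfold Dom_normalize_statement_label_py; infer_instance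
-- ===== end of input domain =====

-- B replaces A's five staged .replace scans + split/join by a single-pass tokenizer with an accumulator (alternative decomposition).


-- ===== PORT A =====
-- str(value or "").strip().lower(), then five sequential .replace calls, then " ".join(text.split())
def normalize_statement_label_py (value : Option String) : String :=
  let text := value.getD ""
  let text := PySem.Str.lower (PySem.Str.strip text)
  let text := PySem.Str.replace text "&" " and "
  let text := PySem.Str.replace text "/" " "
  let text := PySem.Str.replace text "-" " "
  let text := PySem.Str.replace text "_" " "
  let text := PySem.Str.replace text "." " "
  PySem.Str.join " " (PySem.Str.split₀ text)

-- ===== PORT B =====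
-- one-pass tokenizer: separators are whitespace and '/','-','_','.'; '&' emits the word "and"
def pyFlush (toks : List (List Char)) (word : List Char) : List (List Char) :=
  if word.isEmpty then toks else toks ++ [word]

def pySep (c : Char) : Bool :=
  c = '/' || c = '-' || c = '_' || c = '.' || PySem.Chars.isspace c

def tokStep (st : List (List Char) × List Char) (c : Char) : List (List Char) × List Char :=
  if c = '&' then (pyFlush st.1 st.2 ++ ["and".toList], [])
  else if pySep c then (pyFlush st.1 st.2, [])
  else (st.1, st.2 ++ [c])

def normalize_statement_label_py_alt (value : Option String) : String :=
  let text := PySem.Str.lower (PySem.Str.strip (value.getD ""))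
  let st := text.toList.foldl tokStep ([], [])
  PySem.Str.join " " ((pyFlush st.1 st.2).map String.ofList)

-- ===== PRECONDITION & SPEC =====
def Spec_normalize_statement_label_py (value : Option String) (out : String) : Prop := out = normalize_statement_label_py_alt value
instance (value : Option String) (out : String) : Decidable (Spec_normalize_statement_label_py value out) := by unfold Spec_normalize_statement_label_py; infer_instance

-- ===== CLAIM =====
def Claim_equal_normalize_statement_label_py : Prop := ∀ (value : Option String), Dom_normalize_statement_label_py value → Spec_normalize_statement_label_py value (normalize_statement_label_py value)

-- ===== LEMMAS AND PROOFS =====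

-- proof-side table: what A's five replaces do to each character
def pyTranslate (c : Char) : List Char :=
  if c = '&' then " and ".toList
  else if c = '/' || c = '-' || c = '_' || c = '.' then [' ']
  else [c]

-- replacing a single-character needle is a per-character flatMap
theorem replace_go_single (a : Char) (new : List Char) :
    ∀ (l : List Char) (fuel : Nat) (acc : List Char), l.length ≤ fuel →
      PySem.Chars.replace.go [a] new fuel l acc
        = acc.reverse ++ l.flatMap (fun c => if c = a then new else [c]) := by
  intro l
  induction l with
  | nil =>
    intro fuel acc _
    cases fuel <;> simp [PySem.Chars.replace.go]
  | cons c t ih =>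
    intro fuel acc h
    cases fuel with
    | zero => simp at h
    | succ fuel =>
      have hf : t.length ≤ fuel := by simp at h; omega
      conv_lhs => rw [PySem.Chars.replace.go]
      by_cases hc : a = c
      · subst hc
        rw [if_pos (by simp [List.isPrefixOf])]
        rw [show List.drop [a].length (a :: t) = t from by simp]
        rw [ih fuel _ hf]
        simp
      · rw [if_neg (by simp [List.isPrefixOf, hc])]
        rw [ih fuel _ hf]
        simp [Ne.symm hc]

theorem replace_single (cs : List Char) (a : Char) (new : List Char) :
    PySem.Chars.replace cs [a] new = cs.flatMap (fun c => if c = a then new else [c]) := by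
  unfold PySem.Chars.replace
  rw [if_neg (by simp)]
  simpa using replace_go_single a new cs cs.length [] (Nat.le_refl _)

-- the five chained single-char replaces collapse to one table pass
theorem chain_eq_translate (cs : List Char) :
    (((((cs.flatMap (fun c => if c = '&' then " and ".toList else [c])).flatMap
        (fun c => if c = '/' then [' '] else [c])).flatMap
        (fun c => if c = '-' then [' '] else [c])).flatMap
        (fun c => if c = '_' then [' '] else [c])).flatMap
        (fun c => if c = '.' then [' '] else [c]))
      = cs.flatMap pyTranslate := by
  induction cs with
  | nil => rfl
  | cons c t ih =>
    simp only [List.flatMap_cons, List.flatMap_append]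
    rw [ih]
    congr 1
    by_cases h1 : c = '&'
    · subst h1; decide
    by_cases h2 : c = '/'
    · subst h2; decide
    by_cases h3 : c = '-'
    · subst h3; decide
    by_cases h4 : c = '_'
    · subst h4; decide
    by_cases h5 : c = '.'
    · subst h5; decide
    simp [pyTranslate, h1, h2, h3, h4, h5]

-- A's replace chain, as one string equation
theorem repl_chain (t : String) :
    (PySem.Str.replace (PySem.Str.replace (PySem.Str.replace (PySem.Str.replace
      (PySem.Str.replace t "&" " and ") "/" " ") "-" " ") "_" " ") "." " ").toList
    = t.toList.flatMap pyTranslate := by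
  have e1 : ("&" : String).toList = ['&'] := rfl
  have e2 : ("/" : String).toList = ['/'] := rfl
  have e3 : ("-" : String).toList = ['-'] := rfl
  have e4 : ("_" : String).toList = ['_'] := rfl
  have e5 : ("." : String).toList = ['.'] := rfl
  simp only [PySem.Str.toList_replace, e1, e2, e3, e4, e5, replace_single]
  exact chain_eq_translate t.toList

-- single-step behaviour of split₀.go on a space / non-space head
theorem go_space (c : Char) (h : PySem.Chars.isspace c = true) (ts cur : List Char) (acc : List (List Char)) :
    PySem.Chars.split₀.go (c :: ts) cur acc
      = PySem.Chars.split₀.go ts [] (if cur.isEmpty then acc else cur.reverse :: acc) := by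
  rw [PySem.Chars.split₀.go, if_pos h]
  cases cur <;> simp

theorem go_nonspace (c : Char) (h : PySem.Chars.isspace c = false) (ts cur : List Char) (acc : List (List Char)) :
    PySem.Chars.split₀.go (c :: ts) cur acc = PySem.Chars.split₀.go ts (c :: cur) acc := by
  rw [PySem.Chars.split₀.go]
  simp [h]

theorem flush_rev (acc : List (List Char)) (cur : List Char) :
    (if cur.isEmpty then acc else cur.reverse :: acc).reverse = pyFlush acc.reverse cur.reverse := by
  cases cur <;> simp [pyFlush]

-- splitting the translated stream = the one-pass tokenizer, state-generalised
theorem go_eq_tok : ∀ (cs cur : List Char) (acc : List (List Char)),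
    PySem.Chars.split₀.go (cs.flatMap pyTranslate) cur acc
      = (fun st => pyFlush st.1 st.2) (cs.foldl tokStep (acc.reverse, cur.reverse)) := by
  intro cs
  induction cs with
  | nil =>
    intro cur acc
    cases cur with
    | nil => simp [PySem.Chars.split₀.go, pyFlush]
    | cons c t => simp [PySem.Chars.split₀.go, pyFlush]
  | cons c rest ih =>
    intro cur acc
    rw [List.foldl_cons]
    by_cases hamp : c = '&'
    · subst hamp
      rw [List.flatMap_cons, show pyTranslate '&' = [' ', 'a', 'n', 'd', ' '] from by decide,
        List.cons_append, List.cons_append, List.cons_append, List.cons_append, List.cons_append,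
        go_space ' ' (by decide), go_nonspace 'a' (by decide), go_nonspace 'n' (by decide),
        go_nonspace 'd' (by decide), go_space ' ' (by decide)]
      rw [show (if (['d', 'n', 'a'] : List Char).isEmpty = true
              then (if cur.isEmpty = true then acc else cur.reverse :: acc)
              else (['d', 'n', 'a'] : List Char).reverse :: if cur.isEmpty = true then acc else cur.reverse :: acc)
            = "and".toList :: (if cur.isEmpty = true then acc else cur.reverse :: acc) from by norm_num; decide]
      simp only [List.nil_append]
      rw [ih]
      rw [show tokStep (acc.reverse, cur.reverse) '&'
            = (pyFlush acc.reverse cur.reverse ++ ["and".toList], []) from by simp [tokStep]]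
      simp only [List.reverse_cons, List.reverse_nil, flush_rev]
    · by_cases hsep : pySep c = true
      · by_cases hsp : PySem.Chars.isspace c = true
        · have htr : pyTranslate c = [c] := by
            have hnot : ¬(c = '/' || c = '-' || c = '_' || c = '.') = true := by
              intro h
              simp only [Bool.or_eq_true, decide_eq_true_eq] at h
              rcases h with ((rfl | rfl) | rfl) | rfl <;> exact absurd hsp (by decide)
            simp only [pyTranslate, if_neg hamp, if_neg hnot]
          rw [List.flatMap_cons, htr, List.singleton_append, go_space c hsp, ih, flush_rev]
          simp [tokStep, hamp, hsep]
        · have h4 : c = '/' ∨ c = '-' ∨ c = '_' ∨ c = '.' := by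
            simp only [pySep, Bool.or_eq_true, decide_eq_true_eq, hsp] at hsep
            tauto
          have htr : pyTranslate c = [' '] := by
            rcases h4 with h | h | h | h <;> subst h <;> decide
          rw [List.flatMap_cons, htr, List.singleton_append, go_space ' ' (by decide), ih, flush_rev]
          simp [tokStep, hamp, hsep]
      · have hsp : PySem.Chars.isspace c = false := by
          revert hsep
          simp only [pySep, Bool.or_eq_true]
          cases PySem.Chars.isspace c <;> simp
        have hnot : ¬(c = '/' || c = '-' || c = '_' || c = '.') = true := by
          intro h
          apply hsep
          simp only [pySep, Bool.or_eq_true] at h ⊢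
          tauto
        rw [List.flatMap_cons, show pyTranslate c = [c] from by
              simp only [pyTranslate, if_neg hamp, if_neg hnot],
            List.singleton_append, go_nonspace c hsp, ih]
        simp [tokStep, hamp, hsep]

theorem split_eq_tok (cs : List Char) :
    PySem.Chars.split₀ (cs.flatMap pyTranslate)
      = (fun st => pyFlush st.1 st.2) (cs.foldl tokStep ([], [])) := by
  have := go_eq_tok cs [] []
  simpa [PySem.Chars.split₀] using this

-- ===== VERDICT =====
theorem normalize_statement_label_py_spec : Claim_equal_normalize_statement_label_py := by
  intro value _
  unfold Spec_normalize_statement_label_py normalize_statement_label_py normalize_statement_label_py_alt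
  simp only [PySem.Str.split₀]
  rw [repl_chain, split_eq_tok]
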